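-- pv_equiv track=rewrite | github.com/pyrex41/csg_format | grid.py | solve_flood
-- ===== SOURCE A (Python) =====
-- def solve_flood(grid):
--     m = len(grid)
--     n = len(grid[0])
--     def flood_left(i,j):
--         if j > 0 and grid[i][j-1] > 0:
--             grid[i][j-1] += 1
--     def flood_right(i,j):
--         if j < n - 1 and grid[i][j+1] > 0:
--             grid[i][j+1] += 1
--     def flood_up(i,j):
--         if i > 0 and grid[i-1][j] > 0:
--             grid[i-1][j] += 1
--     def flood_down(i,j):
--         if i < m - 1 and grid[i+1][j] > 0:
--             grid[i+1][j] += 1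
--     def flood_neighbors(i,j):
--         flood_left(i,j)
--         flood_up(i,j)
--         flood_right(i,j)
--         flood_down(i,j)
--
--     c = 0
--     for i in range(m):
--         for j in range(n):
--             if grid[i][j] == 1:
--                 c += 1
--             if grid[i][j] > 0:
--                 flood_neighbors(i,j)
--     return c
-- ===== SOURCE B (Python) =====
-- def solve_flood(grid):
--     # Return-value equivalence: unlike A, B does not mutate grid in place.
--     m = len(grid)
--     n = len(grid[0])
--     pos = [[grid[i][j] > 0 for j in range(n)] for i in range(m)]
--     c = 0
--     for i in range(m):
--         for j in range(n):
--             if grid[i][j] == 1 and not (j > 0 and pos[i][j - 1]) and not (i > 0 and pos[i - 1][j]):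
--                 c += 1
--     return c
-- ===== Notes on version B (the rewrite author's own statement) =====
-- stated objective: simpler
-- what changed: A simulates the flood by mutating the grid cell-by-cell in row-major order while reading the partially-mutated values; B precomputes a positivity snapshot of the original grid (positivity is invariant under the floods) and counts in one read-only pass the cells that are 1 and have no positive left or up neighbour, without mutating the grid.
import Mathlib
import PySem

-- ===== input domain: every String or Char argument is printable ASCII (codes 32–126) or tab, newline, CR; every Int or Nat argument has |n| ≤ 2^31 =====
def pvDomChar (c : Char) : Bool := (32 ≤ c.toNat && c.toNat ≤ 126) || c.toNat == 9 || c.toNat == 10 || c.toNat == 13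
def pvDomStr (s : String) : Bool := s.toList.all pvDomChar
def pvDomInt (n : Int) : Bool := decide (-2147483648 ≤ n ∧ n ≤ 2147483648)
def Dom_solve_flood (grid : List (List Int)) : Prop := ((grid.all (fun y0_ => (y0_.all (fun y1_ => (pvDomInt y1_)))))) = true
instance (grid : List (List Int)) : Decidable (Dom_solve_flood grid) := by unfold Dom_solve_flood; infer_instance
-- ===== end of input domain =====

-- B replaces A's order-dependent in-place flood simulation by a positivity snapshot of the
-- original grid plus one read-only counting pass (objective: simpler). A mutates its argument
-- in place, B does not; the equivalence proved here is about the return value only.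

-- ===== PORT A =====
-- shared indexing helpers: grid[i][j] read / write (all loop indices of A and B are the
-- nonnegative ints produced by range, so Nat indices are exact here)
def pvGet2 (g : List (List Int)) (i j : Nat) : Int := (g.getD i []).getD j 0
def pvSet2 (g : List (List Int)) (i j : Nat) (v : Int) : List (List Int) :=
  g.set i ((g.getD i []).set j v)


def pvFloodLeft (g : List (List Int)) (i j : Nat) : List (List Int) :=
  if 0 < j ∧ 0 < pvGet2 g i (j-1) then pvSet2 g i (j-1) (pvGet2 g i (j-1) + 1) else g
def pvFloodRight (n : Nat) (g : List (List Int)) (i j : Nat) : List (List Int) :=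
  if j+1 < n ∧ 0 < pvGet2 g i (j+1) then pvSet2 g i (j+1) (pvGet2 g i (j+1) + 1) else g
def pvFloodUp (g : List (List Int)) (i j : Nat) : List (List Int) :=
  if 0 < i ∧ 0 < pvGet2 g (i-1) j then pvSet2 g (i-1) j (pvGet2 g (i-1) j + 1) else g
def pvFloodDown (m : Nat) (g : List (List Int)) (i j : Nat) : List (List Int) :=
  if i+1 < m ∧ 0 < pvGet2 g (i+1) j then pvSet2 g (i+1) j (pvGet2 g (i+1) j + 1) else g
def pvFloodNbrs (m n : Nat) (g : List (List Int)) (i j : Nat) : List (List Int) :=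
  pvFloodDown m (pvFloodRight n (pvFloodUp (pvFloodLeft g i j) i j) i j) i j

def pvStep (m n : Nat) (s : List (List Int) × Int) (i j : Nat) : List (List Int) × Int :=
  let c := if pvGet2 s.1 i j = 1 then s.2 + 1 else s.2
  if 0 < pvGet2 s.1 i j then (pvFloodNbrs m n s.1 i j, c) else (s.1, c)

def solve_flood (grid : List (List Int)) : Int :=
  let m := grid.length
  let n := (grid.headD []).length
  ((List.range m).foldl
    (fun s i => (List.range n).foldl (fun s j => pvStep m n s i j) s) (grid, (0:Int))).2

-- ===== PORT B =====
def pvPosAt (pos : List (List Bool)) (i j : Nat) : Bool := (pos.getD i []).getD j false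

def solve_flood_alt (grid : List (List Int)) : Int :=
  let m := grid.length
  let n := (grid.headD []).length
  let pos := (List.range m).map (fun i => (List.range n).map (fun j => decide (0 < pvGet2 grid i j)))
  (List.range m).foldl (fun c i => (List.range n).foldl (fun c j =>
    if pvGet2 grid i j = 1 ∧ ¬(0 < j ∧ pvPosAt pos i (j-1)) ∧ ¬(0 < i ∧ pvPosAt pos (i-1) j)
    then c + 1 else c) c) (0:Int)

-- ===== PRECONDITION & SPEC =====
-- Pre_ excludes exactly the inputs on which Python A raises IndexError: the empty grid
-- (len(grid[0])) and grids with some row shorter than the first row (grid[i][j] out of range).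
def Pre_solve_flood (grid : List (List Int)) : Prop :=
  grid ≠ [] ∧ ∀ row ∈ grid, (grid.headD []).length ≤ row.length
instance (grid : List (List Int)) : Decidable (Pre_solve_flood grid) := by
  unfold Pre_solve_flood; infer_instance

def pvWitness_solve_flood : List (List Int) := [[1, 0], [2, 1]]

def Spec_solve_flood (grid : List (List Int)) (out : Int) : Prop := out = solve_flood_alt grid
instance (grid : List (List Int)) (out : Int) : Decidable (Spec_solve_flood grid out) := by
  unfold Spec_solve_flood; infer_instance

-- ===== CLAIM (what is proved, stated in full; the proofs are below) =====
def Claim_equal_solve_flood : Prop := ∀ (grid : List (List Int)), Dom_solve_flood grid → Pre_solve_flood grid → Spec_solve_flood grid (solve_flood grid)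

-- ===== LEMMAS AND PROOFS =====
def pvBump (g : List (List Int)) (p q : Nat) : List (List Int) :=
  if 0 < pvGet2 g p q then pvSet2 g p q (pvGet2 g p q + 1) else g

lemma pvGet2_pos_lt {g : List (List Int)} {p q : Nat} (h : 0 < pvGet2 g p q) :
    p < g.length ∧ q < (g.getD p []).length := by
  constructor
  · by_contra hc
    rw [pvGet2, show g.getD p [] = [] from List.getD_eq_default _ _ (by omega)] at h
    simp at h
  · by_contra hc
    rw [pvGet2, List.getD_eq_default _ _ (by omega)] at h
    omega

lemma pvGetD_row {g : List (List Int)} {p : Nat} (hp : p < g.length) : g.getD p [] = g[p] := by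
  rw [List.getD_eq_getElem?_getD, List.getElem?_eq_getElem hp]; rfl

lemma pvShape_set (g : List (List Int)) (p q : Nat) (v : Int) :
    (pvSet2 g p q v).map List.length = g.map List.length := by
  rw [pvSet2, List.map_set, List.length_set]
  by_cases hp : p < g.length
  · have hp2 : p < (List.map List.length g).length := by simpa using hp
    have h3 : (g.getD p []).length = (List.map List.length g)[p]'hp2 := by
      rw [pvGetD_row hp]; simp
    rw [h3, List.set_getElem_self]
  · rw [List.set_eq_of_length_le (by simp; omega)]

lemma pvGet2_set {g : List (List Int)} {p q : Nat} (v : Int)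
    (hp : p < g.length) (hq : q < (g.getD p []).length) (a b : Nat) :
    pvGet2 (pvSet2 g p q v) a b = if a = p ∧ b = q then v else pvGet2 g a b := by
  simp only [pvGet2, pvSet2, List.getD_eq_getElem?_getD, List.getElem?_set]
  by_cases hap : p = a
  · subst hap
    rw [if_pos rfl, if_pos hp]
    simp only [Option.getD_some, List.getElem?_set]
    have hrow : g[p]?.getD [] = g[p] := by rw [List.getElem?_eq_getElem hp]; rfl
    by_cases hbq : q = b
    · subst hbq
      rw [pvGetD_row hp] at hq
      simp [hrow, hq]
    · rw [if_neg hbq, if_neg (fun hx => hbq hx.2.symm)]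
  · rw [if_neg hap, if_neg (fun hx => hap hx.1.symm)]

lemma pvShape_bump (g : List (List Int)) (p q : Nat) :
    (pvBump g p q).map List.length = g.map List.length := by
  unfold pvBump
  split_ifs with h
  · exact pvShape_set g p q _
  · rfl

lemma pvGet2_bump (g : List (List Int)) (p q a b : Nat) :
    pvGet2 (pvBump g p q) a b
      = pvGet2 g a b + (if a = p ∧ b = q ∧ 0 < pvGet2 g a b then 1 else 0) := by
  unfold pvBump
  by_cases h : 0 < pvGet2 g p q
  · rw [if_pos h]
    obtain ⟨h1, h2⟩ := pvGet2_pos_lt h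
    rw [pvGet2_set _ h1 h2]
    by_cases hc : a = p ∧ b = q
    · obtain ⟨e1, e2⟩ := hc; subst e1; subst e2
      simp [h]
    · rw [if_neg hc, if_neg (fun hx => hc ⟨hx.1, hx.2.1⟩)]; omega
  · rw [if_neg h]
    rw [if_neg (fun hc => by obtain ⟨e1, e2, hpos⟩ := hc; subst e1; subst e2; exact h hpos)]
    omega

lemma pvGet2_gbump (C : Prop) [Decidable C] (g : List (List Int)) (p q a b : Nat) :
    pvGet2 (if C then pvBump g p q else g) a b
      = pvGet2 g a b + (if C ∧ a = p ∧ b = q ∧ 0 < pvGet2 g a b then 1 else 0) := by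
  split_ifs with h hc hc
  · rw [pvGet2_bump, if_pos hc.2]
  · rw [pvGet2_bump, if_neg (fun hx => hc ⟨h, hx⟩)]
  · exact absurd hc.1 h
  · omega

lemma pvPos_gbump (C : Prop) [Decidable C] (g : List (List Int)) (p q a b : Nat) :
    (0 < pvGet2 (if C then pvBump g p q else g) a b) ↔ 0 < pvGet2 g a b := by
  rw [pvGet2_gbump]
  split_ifs with h
  · have := h.2.2.2; omega
  · omega

lemma pvShape_gbump (C : Prop) [Decidable C] (g : List (List Int)) (p q : Nat) :
    (if C then pvBump g p q else g).map List.length = g.map List.length := by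
  split_ifs with h
  · exact pvShape_bump g p q
  · rfl

lemma pv_lin_inj {n p q i j : Nat} (hq : q < n) (hj : j < n) (h : p*n+q = i*n+j) :
    p = i ∧ q = j := by
  have hp : p = i := by
    rcases Nat.lt_trichotomy p i with h' | h' | h'
    · exfalso
      have h2 : (p+1)*n ≤ i*n := Nat.mul_le_mul_right _ h'
      have h3 : (p+1)*n = p*n+n := by ring
      omega
    · exact h'
    · exfalso
      have h2 : (i+1)*n ≤ p*n := Nat.mul_le_mul_right _ h'
      have h3 : (i+1)*n = i*n+n := by ring
      omega
  subst hp
  omega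
def pvInc (grid : List (List Int)) (m n k a b : Nat) : Int :=
  if a < m ∧ b < n ∧ 0 < pvGet2 grid a b then
      (if 0 < b ∧ a*n+(b-1) < k ∧ 0 < pvGet2 grid a (b-1) then 1 else 0)
    + (if b+1 < n ∧ a*n+(b+1) < k ∧ 0 < pvGet2 grid a (b+1) then 1 else 0)
    + (if 0 < a ∧ (a-1)*n+b < k ∧ 0 < pvGet2 grid (a-1) b then 1 else 0)
    + (if a+1 < m ∧ (a+1)*n+b < k ∧ 0 < pvGet2 grid (a+1) b then 1 else 0)
  else 0

def pvMatches (grid g : List (List Int)) (m n k : Nat) : Prop :=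
  g.map List.length = grid.map List.length ∧
  ∀ a b : Nat, pvGet2 g a b = pvGet2 grid a b + pvInc grid m n k a b

lemma pvInc_nonneg (grid : List (List Int)) (m n k a b : Nat) : 0 ≤ pvInc grid m n k a b := by
  unfold pvInc; split_ifs <;> omega

lemma pvInc_nonpos_eq_zero {grid : List (List Int)} {m n k a b : Nat}
    (h : ¬ 0 < pvGet2 grid a b) : pvInc grid m n k a b = 0 := by
  unfold pvInc; rw [if_neg (fun hx => h hx.2.2)]

lemma pvMatches_pos_iff {grid g : List (List Int)} {m n k : Nat}
    (hM : pvMatches grid g m n k) (a b : Nat) :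
    (0 < pvGet2 g a b) ↔ 0 < pvGet2 grid a b := by
  have hv := hM.2 a b
  by_cases hp : 0 < pvGet2 grid a b
  · have := pvInc_nonneg grid m n k a b; constructor <;> intro <;> omega
  · rw [pvInc_nonpos_eq_zero hp] at hv; omega

lemma pvFloodLeft_eq (g : List (List Int)) (i j : Nat) :
    pvFloodLeft g i j = if 0 < j then pvBump g i (j-1) else g := by
  unfold pvFloodLeft pvBump
  by_cases h : 0 < j <;> simp [h]

lemma pvFloodRight_eq (n : Nat) (g : List (List Int)) (i j : Nat) :
    pvFloodRight n g i j = if j+1 < n then pvBump g i (j+1) else g := by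
  unfold pvFloodRight pvBump
  by_cases h : j+1 < n <;> simp [h]

lemma pvFloodUp_eq (g : List (List Int)) (i j : Nat) :
    pvFloodUp g i j = if 0 < i then pvBump g (i-1) j else g := by
  unfold pvFloodUp pvBump
  by_cases h : 0 < i <;> simp [h]

lemma pvFloodDown_eq (m : Nat) (g : List (List Int)) (i j : Nat) :
    pvFloodDown m g i j = if i+1 < m then pvBump g (i+1) j else g := by
  unfold pvFloodDown pvBump
  by_cases h : i+1 < m <;> simp [h]

-- closed form of one flood_neighbors call, values read in g
lemma pvGet2_floodNbrs (m n : Nat) (g : List (List Int)) (i j a b : Nat) :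
    pvGet2 (pvFloodNbrs m n g i j) a b
      = pvGet2 g a b
        + (if 0 < j ∧ a = i ∧ b = j-1 ∧ 0 < pvGet2 g a b then 1 else 0)
        + (if 0 < i ∧ a = i-1 ∧ b = j ∧ 0 < pvGet2 g a b then 1 else 0)
        + (if j+1 < n ∧ a = i ∧ b = j+1 ∧ 0 < pvGet2 g a b then 1 else 0)
        + (if i+1 < m ∧ a = i+1 ∧ b = j ∧ 0 < pvGet2 g a b then 1 else 0) := by
  rw [pvFloodNbrs, pvFloodDown_eq, pvFloodRight_eq, pvFloodUp_eq, pvFloodLeft_eq]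
  set g1 := if 0 < j then pvBump g i (j-1) else g with hg1
  set g2 := if 0 < i then pvBump g1 (i-1) j else g1 with hg2
  set g3 := if j+1 < n then pvBump g2 i (j+1) else g2 with hg3
  have p1 : ∀ x y, (0 < pvGet2 g1 x y) ↔ 0 < pvGet2 g x y := by
    intro x y; rw [hg1]; exact pvPos_gbump _ g _ _ x y
  have p2 : ∀ x y, (0 < pvGet2 g2 x y) ↔ 0 < pvGet2 g x y := by
    intro x y; rw [hg2, pvPos_gbump]; exact p1 x y
  have p3 : ∀ x y, (0 < pvGet2 g3 x y) ↔ 0 < pvGet2 g x y := by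
    intro x y; rw [hg3, pvPos_gbump]; exact p2 x y
  rw [pvGet2_gbump]
  simp only [p3]
  rw [hg3, pvGet2_gbump]
  simp only [p2]
  rw [hg2, pvGet2_gbump]
  simp only [p1]
  rw [hg1, pvGet2_gbump]

lemma pvShape_floodNbrs (m n : Nat) (g : List (List Int)) (i j : Nat) :
    (pvFloodNbrs m n g i j).map List.length = g.map List.length := by
  rw [pvFloodNbrs, pvFloodDown_eq, pvFloodRight_eq, pvFloodUp_eq, pvFloodLeft_eq]
  simp only [pvShape_gbump]

lemma pvTerm_succ (P Q R2 : Prop) [Decidable P] [Decidable Q] [Decidable R2] (x k : Nat)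
    (hiff : (P ∧ x = k ∧ Q) ↔ R2) :
    (if P ∧ x < k+1 ∧ Q then (1:Int) else 0)
      = (if P ∧ x < k ∧ Q then 1 else 0) + (if R2 then 1 else 0) := by
  by_cases hR : R2
  · obtain ⟨hP, hx, hQ⟩ := hiff.mpr hR
    rw [if_pos ⟨hP, by omega, hQ⟩, if_neg (fun hx2 => by omega), if_pos hR]
    norm_num
  · by_cases hc : P ∧ x < k ∧ Q
    · rw [if_pos ⟨hc.1, by omega, hc.2.2⟩, if_pos hc, if_neg hR]; ring
    · rw [if_neg ?_, if_neg hc, if_neg hR]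
      · ring
      · intro hx2
        rcases Nat.lt_succ_iff_lt_or_eq.mp hx2.2.1 with h | h
        · exact hc ⟨hx2.1, h, hx2.2.2⟩
        · exact hR (hiff.mp ⟨hx2.1, h, hx2.2.2⟩)

lemma pvInc_succ (grid : List (List Int)) (m n k i j a b : Nat)
    (hi : i < m) (hj : j < n) (hk : k = i*n+j) :
    pvInc grid m n (k+1) a b
      = pvInc grid m n k a b
        + (if 0 < pvGet2 grid i j then
              (if 0 < j ∧ a = i ∧ b = j-1 ∧ 0 < pvGet2 grid a b then 1 else 0)
            + (if 0 < i ∧ a = i-1 ∧ b = j ∧ 0 < pvGet2 grid a b then 1 else 0)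
            + (if j+1 < n ∧ a = i ∧ b = j+1 ∧ 0 < pvGet2 grid a b then 1 else 0)
            + (if i+1 < m ∧ a = i+1 ∧ b = j ∧ 0 < pvGet2 grid a b then 1 else 0)
          else 0) := by
  unfold pvInc
  by_cases h0 : a < m ∧ b < n ∧ 0 < pvGet2 grid a b
  · rw [if_pos h0, if_pos h0]
    obtain ⟨ham, hbn, hab⟩ := h0
    by_cases hp : 0 < pvGet2 grid i j
    · rw [if_pos hp]
      rw [pvTerm_succ _ _ (j+1 < n ∧ a = i ∧ b = j+1 ∧ 0 < pvGet2 grid a b) _ k ?_,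
          pvTerm_succ _ _ (0 < j ∧ a = i ∧ b = j-1 ∧ 0 < pvGet2 grid a b) _ k ?_,
          pvTerm_succ _ _ (i+1 < m ∧ a = i+1 ∧ b = j ∧ 0 < pvGet2 grid a b) _ k ?_,
          pvTerm_succ _ _ (0 < i ∧ a = i-1 ∧ b = j ∧ 0 < pvGet2 grid a b) _ k ?_]
      · ring
      -- term4 (down neighbour (a+1,b)) ↔ up-delta
      · constructor
        · rintro ⟨h1, h2, h3⟩
          obtain ⟨e1, e2⟩ := pv_lin_inj hbn hj (h2.trans hk)
          exact ⟨by omega, by omega, e2, hab⟩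
        · rintro ⟨h1, h2, h3, h4⟩
          refine ⟨by omega, ?_, ?_⟩
          · rw [hk, ← h3, show a+1 = i by omega]
          · rw [show a+1 = i by omega, h3]; exact hp
      -- term3 (up neighbour (a-1,b)) ↔ down-delta
      · constructor
        · rintro ⟨h1, h2, h3⟩
          obtain ⟨e1, e2⟩ := pv_lin_inj hbn hj (h2.trans hk)
          exact ⟨by omega, by omega, e2, hab⟩
        · rintro ⟨h1, h2, h3, h4⟩
          refine ⟨by omega, ?_, ?_⟩
          · rw [hk, ← h3, show a-1 = i by omega]
          · rw [show a-1 = i by omega, h3]; exact hp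
      -- term2 (right neighbour (a,b+1)) ↔ left-delta
      · constructor
        · rintro ⟨h1, h2, h3⟩
          obtain ⟨e1, e2⟩ := pv_lin_inj (show b+1 < n from h1) hj (h2.trans hk)
          exact ⟨by omega, e1, by omega, hab⟩
        · rintro ⟨h1, h2, h3, h4⟩
          refine ⟨?_, ?_, ?_⟩
          · omega
          · rw [hk, ← h2, show b+1 = j by omega]
          · rw [show b+1 = j by omega, h2]; exact hp
      -- term1 (left neighbour (a,b-1)) ↔ right-delta
      · constructor
        · rintro ⟨h1, h2, h3⟩
          obtain ⟨e1, e2⟩ := pv_lin_inj (show b-1 < n by omega) hj (h2.trans hk)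
          exact ⟨by omega, e1, by omega, hab⟩
        · rintro ⟨h1, h2, h3, h4⟩
          refine ⟨by omega, ?_, ?_⟩
          · rw [hk, ← h2, show b-1 = j by omega]
          · rw [show b-1 = j by omega, h2]; exact hp
    · rw [if_neg hp]
      rw [pvTerm_succ _ _ False _ k (by
            constructor
            · rintro ⟨h1, h2, h3⟩
              obtain ⟨e1, e2⟩ := pv_lin_inj (show b-1 < n by omega) hj (h2.trans hk)
              exact hp (by rwa [e1, e2] at h3)
            · exact False.elim),
          pvTerm_succ _ _ False _ k (by
            constructor
            · rintro ⟨h1, h2, h3⟩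
              obtain ⟨e1, e2⟩ := pv_lin_inj (show b+1 < n from h1) hj (h2.trans hk)
              exact hp (by rwa [e1, e2] at h3)
            · exact False.elim),
          pvTerm_succ _ _ False _ k (by
            constructor
            · rintro ⟨h1, h2, h3⟩
              obtain ⟨e1, e2⟩ := pv_lin_inj hbn hj (h2.trans hk)
              exact hp (by rwa [e1, e2] at h3)
            · exact False.elim),
          pvTerm_succ _ _ False _ k (by
            constructor
            · rintro ⟨h1, h2, h3⟩
              obtain ⟨e1, e2⟩ := pv_lin_inj hbn hj (h2.trans hk)
              exact hp (by rwa [e1, e2] at h3)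
            · exact False.elim)]
      simp
  · rw [if_neg h0, if_neg h0]
    by_cases hp : 0 < pvGet2 grid i j
    · rw [if_pos hp]
      have z1 : (if 0 < j ∧ a = i ∧ b = j-1 ∧ 0 < pvGet2 grid a b then (1:Int) else 0) = 0 :=
        if_neg (fun hx => h0 ⟨by have e := hx.2.1; omega, by have e := hx.2.2.1; omega, hx.2.2.2⟩)
      have z2 : (if 0 < i ∧ a = i-1 ∧ b = j ∧ 0 < pvGet2 grid a b then (1:Int) else 0) = 0 :=
        if_neg (fun hx => h0 ⟨by have e := hx.2.1; omega, by have e := hx.2.2.1; omega, hx.2.2.2⟩)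
      have z3 : (if j+1 < n ∧ a = i ∧ b = j+1 ∧ 0 < pvGet2 grid a b then (1:Int) else 0) = 0 :=
        if_neg (fun hx => h0 ⟨by have e := hx.2.1; omega, by have e := hx.2.2.1; have e2 := hx.1; omega, hx.2.2.2⟩)
      have z4 : (if i+1 < m ∧ a = i+1 ∧ b = j ∧ 0 < pvGet2 grid a b then (1:Int) else 0) = 0 :=
        if_neg (fun hx => h0 ⟨by have e := hx.2.1; have e2 := hx.1; omega, by have e := hx.2.2.1; omega, hx.2.2.2⟩)
      rw [z1, z2, z3, z4]
      ring
    · rw [if_neg hp]; ring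

def pvBCondB (grid : List (List Int)) (i j : Nat) : Bool :=
  decide (pvGet2 grid i j = 1 ∧ ¬(0 < j ∧ 0 < pvGet2 grid i (j-1)) ∧ ¬(0 < i ∧ 0 < pvGet2 grid (i-1) j))

lemma pvCount_iff {grid g : List (List Int)} {m n k i j : Nat}
    (hM : pvMatches grid g m n k) (hi : i < m) (hj : j < n) (hk : k = i*n+j) :
    (pvGet2 g i j = 1)
      ↔ (pvGet2 grid i j = 1 ∧ ¬(0 < j ∧ 0 < pvGet2 grid i (j-1)) ∧ ¬(0 < i ∧ 0 < pvGet2 grid (i-1) j)) := by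
  have hv := hM.2 i j
  have hup : 0 < i → (i-1)*n + n = i*n := by
    intro h'
    calc (i-1)*n + n = ((i-1)+1)*n := by ring
      _ = i*n := by rw [show (i-1)+1 = i by omega]
  have hdn : (i+1)*n = i*n + n := by ring
  by_cases hp : 0 < pvGet2 grid i j
  · rw [pvInc, if_pos ⟨hi, hj, hp⟩] at hv
    have c1 : (0 < j ∧ i*n+(j-1) < k ∧ 0 < pvGet2 grid i (j-1)) ↔ (0 < j ∧ 0 < pvGet2 grid i (j-1)) := by
      constructor
      · rintro ⟨x, _, z⟩; exact ⟨x, z⟩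
      · rintro ⟨x, z⟩; exact ⟨x, by omega, z⟩
    have c2 : ¬(j+1 < n ∧ i*n+(j+1) < k ∧ 0 < pvGet2 grid i (j+1)) := by
      rintro ⟨_, h2, _⟩; omega
    have c3 : (0 < i ∧ (i-1)*n+j < k ∧ 0 < pvGet2 grid (i-1) j) ↔ (0 < i ∧ 0 < pvGet2 grid (i-1) j) := by
      constructor
      · rintro ⟨x, _, z⟩; exact ⟨x, z⟩
      · rintro ⟨x, z⟩; exact ⟨x, by have := hup x; omega, z⟩
    have c4 : ¬(i+1 < m ∧ (i+1)*n+j < k ∧ 0 < pvGet2 grid (i+1) j) := by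
      rintro ⟨_, h2, _⟩; omega
    rw [if_neg c2, if_neg c4, if_congr c1 rfl rfl, if_congr c3 rfl rfl] at hv
    by_cases d1 : 0 < j ∧ 0 < pvGet2 grid i (j-1) <;>
      by_cases d2 : 0 < i ∧ 0 < pvGet2 grid (i-1) j <;>
      simp only [d1, d2, if_true, if_false, not_true, not_false_iff, and_true] at hv ⊢ <;>
      simp at hv ⊢ <;>
      omega
  · rw [pvInc, if_neg (fun hx => hp hx.2.2)] at hv
    constructor
    · intro h; exfalso; omega
    · rintro ⟨h1, _, _⟩; exfalso; omega

lemma pvMatches_step {grid g : List (List Int)} {m n k i j : Nat}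
    (hi : i < m) (hj : j < n) (hk : k = i*n+j) (hM : pvMatches grid g m n k) :
    pvMatches grid (if 0 < pvGet2 g i j then pvFloodNbrs m n g i j else g) m n (k+1) := by
  have hpos := pvMatches_pos_iff hM
  constructor
  · split_ifs with h
    · rw [pvShape_floodNbrs]; exact hM.1
    · exact hM.1
  · intro a b
    by_cases hp : 0 < pvGet2 grid i j
    · rw [if_pos ((hpos i j).mpr hp), pvGet2_floodNbrs]
      simp only [fun x y => propext (hpos x y)]
      rw [hM.2 a b, pvInc_succ grid m n k i j a b hi hj hk, if_pos hp]
      ring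
    · rw [if_neg (fun hx => hp ((hpos i j).mp hx)), hM.2 a b,
          pvInc_succ grid m n k i j a b hi hj hk, if_neg hp]
      ring

lemma pvMatches_zero (grid : List (List Int)) (m n : Nat) : pvMatches grid grid m n 0 := by
  constructor
  · rfl
  · intro a b
    rw [pvInc]
    split_ifs with h0 z1 z2 z3 z4 <;> omega

lemma pv_inner (grid : List (List Int)) (m n i : Nat) (hi : i < m) :
    ∀ (t j0 : Nat) (g : List (List Int)) (c : Int), j0 + t = n →
      pvMatches grid g m n (i*n+j0) →
      ∃ g', (List.range' j0 t).foldl (fun s j => pvStep m n s i j) (g, c)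
              = (g', (List.range' j0 t).foldl (fun c j => if pvBCondB grid i j then c+1 else c) c)
            ∧ pvMatches grid g' m n (i*n+n) := by
  intro t
  induction t with
  | zero =>
    intro j0 g c hj0 hM
    exact ⟨g, by simp, by rwa [show i*n+n = i*n+j0 by omega]⟩
  | succ t ih =>
    intro j0 g c hj0 hM
    have hj0n : j0 < n := by omega
    have hstep := pvMatches_step hi hj0n rfl hM
    have hcnt : (if pvGet2 g i j0 = 1 then c+1 else c) = (if pvBCondB grid i j0 then c+1 else c) :=
      if_congr (by simp only [pvBCondB, decide_eq_true_eq]; exact pvCount_iff hM hi hj0n rfl) rfl rfl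
    obtain ⟨g', he, hM'⟩ := ih (j0+1)
      (if 0 < pvGet2 g i j0 then pvFloodNbrs m n g i j0 else g)
      (if pvBCondB grid i j0 then c+1 else c)
      (by omega)
      (by rw [show i*n+(j0+1) = (i*n+j0)+1 by omega]; exact hstep)
    refine ⟨g', ?_, hM'⟩
    rw [List.range'_succ, List.foldl_cons, List.foldl_cons]
    rw [show pvStep m n (g, c) i j0
          = (if 0 < pvGet2 g i j0 then pvFloodNbrs m n g i j0 else g,
             if pvGet2 g i j0 = 1 then c+1 else c) from by
        rw [pvStep]; by_cases h : 0 < pvGet2 g i j0 <;> simp [h]]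
    rw [hcnt]
    exact he

lemma pv_outer (grid : List (List Int)) (m n : Nat) :
    ∀ (t i0 : Nat) (g : List (List Int)) (c : Int), i0 + t = m →
      pvMatches grid g m n (i0*n) →
      ((List.range' i0 t).foldl
          (fun s i => (List.range n).foldl (fun s j => pvStep m n s i j) s) (g, c)).2
        = (List.range' i0 t).foldl
            (fun c i => (List.range n).foldl (fun c j => if pvBCondB grid i j then c+1 else c) c) c := by
  intro t
  induction t with
  | zero => intro i0 g c h0 hM; simp
  | succ t ih =>
    intro i0 g c h0 hM
    have hi0 : i0 < m := by omega
    obtain ⟨g', he, hM'⟩ := pv_inner grid m n i0 hi0 n 0 g c (by omega)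
      (by rwa [show i0*n+0 = i0*n by omega])
    rw [List.range'_succ, List.foldl_cons, List.foldl_cons]
    have he' : (List.range n).foldl (fun s j => pvStep m n s i0 j) (g, c)
        = (g', (List.range n).foldl (fun c j => if pvBCondB grid i0 j then c+1 else c) c) := by
      rw [List.range_eq_range']; exact he
    rw [he']
    exact ih (i0+1) g' _ (by omega) (by rw [show (i0+1)*n = i0*n+n by ring]; exact hM')


lemma pvPosAt_map (grid : List (List Int)) (m n a b : Nat) (ha : a < m) (hb : b < n) :
    pvPosAt ((List.range m).map (fun i => (List.range n).map (fun j => decide (0 < pvGet2 grid i j)))) a b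
      = decide (0 < pvGet2 grid a b) := by
  unfold pvPosAt
  simp [List.getD_eq_getElem?_getD, List.getElem?_map, List.getElem?_range ha, List.getElem?_range hb]

lemma pv_alt_eq (grid : List (List Int)) :
    solve_flood_alt grid
      = (List.range grid.length).foldl
          (fun c i => (List.range (grid.headD []).length).foldl
            (fun c j => if pvBCondB grid i j then c+1 else c) c) 0 := by
  rw [solve_flood_alt]
  apply PySem.List.foldl_congr_mem
  intro c i hi
  rw [List.mem_range] at hi
  apply PySem.List.foldl_congr_mem
  intro c' j hj
  rw [List.mem_range] at hj
  apply if_congr ?_ rfl rfl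
  simp only [pvBCondB, decide_eq_true_eq]
  constructor
  · rintro ⟨h1, h2, h3⟩
    refine ⟨h1, fun hx => h2 ⟨hx.1, ?_⟩, fun hx => h3 ⟨hx.1, ?_⟩⟩
    · rw [pvPosAt_map grid _ _ i (j-1) hi (by omega)]; simpa using hx.2
    · rw [pvPosAt_map grid _ _ (i-1) j (by omega) hj]; simpa using hx.2
  · rintro ⟨h1, h2, h3⟩
    refine ⟨h1, fun hx => h2 ⟨hx.1, ?_⟩, fun hx => h3 ⟨hx.1, ?_⟩⟩
    · have := hx.2; rw [pvPosAt_map grid _ _ i (j-1) hi (by omega)] at this; simpa using this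
    · have := hx.2; rw [pvPosAt_map grid _ _ (i-1) j (by omega) hj] at this; simpa using this

theorem solve_flood_total_eq (grid : List (List Int)) : solve_flood grid = solve_flood_alt grid := by
  rw [solve_flood, pv_alt_eq]
  rw [List.range_eq_range' (n := grid.length)]
  exact pv_outer grid grid.length (grid.headD []).length grid.length 0 grid 0 (by omega)
    (by rw [show 0*(grid.headD []).length = 0 by ring]; exact pvMatches_zero _ _ _)

-- ===== VERDICT (by name: the statement is the Claim_ definition above) =====
theorem solve_flood_spec : Claim_equal_solve_flood := by
  intro grid _ _
  unfold Spec_solve_flood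
  exact solve_flood_total_eq grid
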